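-- pv_equiv track=rewrite | github.com/ericgong2005/LLMSeuss | bigram_model.py | full_decode
-- ===== SOURCE A (Python) =====
-- def full_decode(code: list[str]) -> str :
--     status = 0
--     final = ""
--     for element in code:
--         if element == "<C>":
--             status = 1
--         elif element == "<A>":
--             status = 2
--         else:
--             if status == 0:
--                 final += element
--             elif status == 1:
--                 final += element.capitalize()
--             else:
--                 final += element.upper()
--             status = 0
--     return final
-- ===== SOURCE B (Python) =====
-- def full_decode(code: list[str]) -> str:
--     # Stateless look-back: pair each token with its predecessor instead of carrying a status flag.
--     pieces = []
--     for prev, element in zip([None] + code, code):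
--         if element in ("<C>", "<A>"):
--             continue
--         if prev == "<A>":
--             pieces.append(element.upper())
--         elif prev == "<C>":
--             pieces.append(element.capitalize())
--         else:
--             pieces.append(element)
--     return "".join(pieces)
-- ===== Notes on version B (the rewrite author's own statement) =====
-- stated objective: simpler
-- what changed: Replaced the carried status state machine with a stateless look-back pass that pairs each token with its immediate predecessor and joins the transformed pieces at the end.
import Mathlib
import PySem

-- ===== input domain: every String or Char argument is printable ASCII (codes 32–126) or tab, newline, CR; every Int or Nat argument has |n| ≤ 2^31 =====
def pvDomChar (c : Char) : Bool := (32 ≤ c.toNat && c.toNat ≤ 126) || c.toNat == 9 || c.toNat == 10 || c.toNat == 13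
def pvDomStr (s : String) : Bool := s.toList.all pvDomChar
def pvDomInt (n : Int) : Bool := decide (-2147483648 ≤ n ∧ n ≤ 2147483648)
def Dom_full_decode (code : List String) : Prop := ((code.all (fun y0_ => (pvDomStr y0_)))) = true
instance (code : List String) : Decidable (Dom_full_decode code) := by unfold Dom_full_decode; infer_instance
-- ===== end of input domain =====

-- B replaces A's carried status state machine by a stateless look-back pass (simpler decomposition).

-- str.capitalize: first char uppercased, rest lowercased — exact on the ASCII domain (hand port; no PySem primitive)
def pyCapitalize (s : String) : String :=
  match s.toList with
  | [] => ""
  | c :: cs => String.ofList (PySem.Chars.upperChar c :: cs.map PySem.Chars.lowerChar)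

-- ===== PORT A =====
def full_decode (code : List String) : String :=
  (code.foldl (fun (st : Nat × String) element =>
      if element == "<C>" then (1, st.2)
      else if element == "<A>" then (2, st.2)
      else
        (0, st.2 ++ (if st.1 == 0 then element
                     else if st.1 == 1 then pyCapitalize element
                     else PySem.Str.upper element)))
    (0, "")).2

-- ===== PORT B =====
def full_decode_alt (code : List String) : String :=
  PySem.Str.join "" (((none :: code.map some).zip code).filterMap (fun p =>
    let prev := p.1
    let element := p.2
    if element == "<C>" || element == "<A>" then none
    else if prev == some "<A>" then some (PySem.Str.upper element)
    else if prev == some "<C>" then some (pyCapitalize element)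
    else some element))

-- ===== PRECONDITION & SPEC =====
def Spec_full_decode (code : List String) (out : String) : Prop := out = full_decode_alt code
instance (code : List String) (out : String) : Decidable (Spec_full_decode code out) := by unfold Spec_full_decode; infer_instance

-- ===== CLAIM (what is proved, stated in full; the proofs are below) =====
def Claim_equal_full_decode : Prop := ∀ (code : List String), Dom_full_decode code → Spec_full_decode code (full_decode code)

-- ===== LEMMAS AND PROOFS =====

def pvStep : Nat × String → String → Nat × String :=
  fun st element =>
      if element == "<C>" then (1, st.2)
      else if element == "<A>" then (2, st.2)
      else
        (0, st.2 ++ (if st.1 == 0 then element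
                     else if st.1 == 1 then pyCapitalize element
                     else PySem.Str.upper element))

def pvF : Option String × String → Option String :=
  fun p =>
    if p.2 == "<C>" || p.2 == "<A>" then none
    else if p.1 == some "<A>" then some (PySem.Str.upper p.2)
    else if p.1 == some "<C>" then some (pyCapitalize p.2)
    else some p.2

def pvStatusOf : Option String → Nat
  | some "<C>" => 1
  | some "<A>" => 2
  | _ => 0

theorem pv_join_cons (x : String) (xs : List String) :
    PySem.Str.join "" (x :: xs) = x ++ PySem.Str.join "" xs := by
  cases xs with
  | nil =>
    simp [PySem.Str.join, PySem.Chars.join_singleton, PySem.Chars.join_nil]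
  | cons y ys =>
    simp only [PySem.Str.join, List.map_cons]
    rw [PySem.Chars.join_cons_cons]
    simp [String.ofList_append]

theorem pv_statusOf_cases (prev : Option String) :
    (prev = some "<C>" ∧ pvStatusOf prev = 1) ∨
    (prev = some "<A>" ∧ pvStatusOf prev = 2) ∨
    (prev ≠ some "<C>" ∧ prev ≠ some "<A>" ∧ pvStatusOf prev = 0) := by
  match prev with
  | none => right; right; simp [pvStatusOf]
  | some s =>
    by_cases h1 : s = "<C>"
    · left; simp [h1, pvStatusOf]
    · by_cases h2 : s = "<A>"
      · right; left; simp [h2, pvStatusOf]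
      · right; right
        refine ⟨by simp [h1], by simp [h2], ?_⟩
        simp only [pvStatusOf]
        split <;> simp_all

theorem pv_main (code : List String) (prev : Option String) (final : String) :
    (code.foldl pvStep (pvStatusOf prev, final)).2 =
      final ++ PySem.Str.join "" (((prev :: code.map some).zip code).filterMap pvF) := by
  induction code generalizing prev final with
  | nil => simp [PySem.Str.join, PySem.Chars.join, List.intercalate]
  | cons e rest ih =>
    have hz : ((prev :: (e :: rest).map some).zip (e :: rest)).filterMap pvF =
        (pvF (prev, e)).toList ++ (((some e :: rest.map some).zip rest).filterMap pvF) := by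
      simp [List.filterMap_cons]
      cases pvF (prev, e) <;> simp
    by_cases hC : e = "<C>"
    · have h1 : pvStep (pvStatusOf prev, final) e = (pvStatusOf (some e), final) := by
        simp [pvStep, hC, pvStatusOf]
      have h2 : pvF (prev, e) = none := by simp [pvF, hC]
      simp only [List.foldl_cons, h1, ih (some e) final, hz, h2]
      simp
    · by_cases hA : e = "<A>"
      · have h1 : pvStep (pvStatusOf prev, final) e = (pvStatusOf (some e), final) := by
          simp [pvStep, hA, pvStatusOf]
        have h2 : pvF (prev, e) = none := by simp [pvF, hA]
        simp only [List.foldl_cons, h1, ih (some e) final, hz, h2]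
        simp
      · -- emitted token: the transform chosen by status equals the one chosen by look-back
        have hs : pvStatusOf (some e) = 0 := by
          simp only [pvStatusOf]; split <;> simp_all
        set t : String :=
          (if pvStatusOf prev == 0 then e
           else if pvStatusOf prev == 1 then pyCapitalize e
           else PySem.Str.upper e) with ht
        have h1 : pvStep (pvStatusOf prev, final) e = (pvStatusOf (some e), final ++ t) := by
          simp [pvStep, hC, hA, hs, ht]
        have h2 : pvF (prev, e) = some t := by
          rcases pv_statusOf_cases prev with ⟨hp, hv⟩ | ⟨hp, hv⟩ | ⟨hp1, hp2, hv⟩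
          · simp [pvF, hC, hA, hp, ht, pvStatusOf]
          · simp [pvF, hC, hA, hp, ht, pvStatusOf]
          · simp [pvF, hC, hA, hp1, hp2, hv, ht]
        simp only [List.foldl_cons, h1, ih (some e) (final ++ t), hz, h2]
        simp [pv_join_cons, String.append_assoc]

-- ===== VERDICT (by name: the statement is the Claim_ definition above) =====
theorem full_decode_spec : Claim_equal_full_decode := by
  intro code _
  show full_decode code = full_decode_alt code
  have h := pv_main code none ""
  simp only [String.empty_append] at h
  exact h
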